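-- pv_equiv track=rewrite | github.com/theElandor/codissy2025 | day6/c.py | find
-- ===== SOURCE A (Python) =====
-- def convert(c):
-- 	if c.islower():
-- 		return ord(c) - 96
-- 	else:
-- 		return ord(c) - 65 + 27
--
-- def process_prev(prev):
-- 	prev *= 2
-- 	prev -= 5
-- 	if 1 <= prev <= 52:
-- 		return prev
-- 	elif prev < 1:
-- 		while not(1 <= prev <= 52):
-- 			prev += 52
-- 		return prev
-- 	elif prev > 52:
-- 		while not(1 <= prev <= 52):
-- 			prev -= 52
-- 		return prev
--
-- def find(i, s):
-- 	if s[i].isalpha():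
-- 		return convert(s[i])
-- 	elif s[i-1].isalpha():
-- 		prev = convert(s[i-1])
-- 		return process_prev(prev)
-- 	else:
-- 		prev = find(i-1, s)
-- 		return process_prev(prev)
-- ===== SOURCE B (Python) =====
-- def find(i, s):
--     p, k = i, 0
--     while not s[p].isalpha():
--         p -= 1
--         k += 1
--     base = ord(s[p]) - 96 if s[p].islower() else ord(s[p]) - 38
--     m = pow(2, k, 52)
--     return (base * m - 5 * (m - 1) - 1) % 52 + 1
-- ===== Notes on version B (the rewrite author's own statement) =====
-- stated objective: alternative
-- what changed: Recursive back-walk with one process_prev per recursion level is replaced by an iterative scan to the nearest letter plus a single closed-form modular evaluation (2^k mod 52) of the k-fold process_prev.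
import Mathlib
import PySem

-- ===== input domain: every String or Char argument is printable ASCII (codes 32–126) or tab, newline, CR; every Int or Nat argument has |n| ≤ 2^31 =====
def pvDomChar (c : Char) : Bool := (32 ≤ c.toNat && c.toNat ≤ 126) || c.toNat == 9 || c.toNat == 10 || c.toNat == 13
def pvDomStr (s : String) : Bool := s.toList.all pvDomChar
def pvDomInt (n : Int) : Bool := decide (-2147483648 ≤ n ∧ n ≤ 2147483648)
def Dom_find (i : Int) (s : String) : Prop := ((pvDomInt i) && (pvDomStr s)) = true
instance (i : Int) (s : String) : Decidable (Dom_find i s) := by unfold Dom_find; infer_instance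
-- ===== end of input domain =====

-- B replaces the recursive walk by one iterative scan to the nearest letter followed by a
-- closed-form modular-power formula replacing the k-fold application of process_prev;
-- where A raises IndexError, B's scan reaches the same out-of-range access and raises too.

-- ===== PORT A =====
-- while not(1 <= prev <= 52): prev += 52  — entered only with prev < 1, where the loop
-- condition is equivalent to prev < 1 on every reached state (the first value ≥ 1 is ≤ 52); exact there.
def addLoop (p : Int) : Int :=
  if p < 1 then addLoop (p + 52) else p
termination_by (1 - p).toNat
decreasing_by omega

-- while not(1 <= prev <= 52): prev -= 52  — entered only with prev > 52; exact there, symmetrically.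
def subLoop (p : Int) : Int :=
  if p > 52 then subLoop (p - 52) else p
termination_by (p - 52).toNat
decreasing_by omega

def convert (c : Char) : Int :=
  if PySem.Chars.islower c then (c.toNat : Int) - 96 else (c.toNat : Int) - 65 + 27

def process_prev (prev : Int) : Int :=
  let pr := prev * 2 - 5
  if 1 ≤ pr ∧ pr ≤ 52 then pr
  else if pr < 1 then addLoop pr
  else subLoop pr

def find (i : Int) (s : String) : Int :=
  match _h1 : PySem.List.pyGet? s.toList i with
  | none => 0  -- IndexError (excluded by Pre_find)
  | some c =>
    if PySem.Chars.isalpha c then convert c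
    else
      match h2 : PySem.List.pyGet? s.toList (i - 1) with
      | none => 0  -- IndexError (excluded by Pre_find)
      | some c' =>
        if PySem.Chars.isalpha c' then process_prev (convert c')
        else process_prev (find (i - 1) s)
termination_by (i + s.toList.length + 1).toNat
decreasing_by
  have hin : PySem.Raise.InRange s.toList.length (i - 1) := by
    by_contra hc
    exact absurd ((PySem.List.pyGet?_eq_none_iff _ _).mpr hc) (by simp [h2])
  obtain ⟨ha, _hb⟩ := hin
  omega

-- ===== PORT B =====
-- Source B's closed-form evaluation after the scan
def code (c : Char) (k : Nat) : Int :=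
  let base : Int := if PySem.Chars.islower c then (c.toNat : Int) - 96 else (c.toNat : Int) - 38
  let m : Int := PySem.Int.mod (2 ^ k) 52
  PySem.Int.mod (base * m - 5 * (m - 1) - 1) 52 + 1

-- Source B's while loop (p -= 1 each step); fuel 2*len+2 provably suffices under Pre_find
def loopB (s : List Char) (p : Int) (k : Nat) : Nat → Option (Char × Nat)
  | 0 => none
  | fuel + 1 =>
    match PySem.List.pyGet? s p with
    | none => none  -- IndexError (excluded by Pre_find)
    | some c =>
      if PySem.Chars.isalpha c then some (c, k)
      else loopB s (p - 1) (k + 1) fuel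

def find_alt (i : Int) (s : String) : Int :=
  match loopB s.toList i 0 (2 * s.toList.length + 2) with
  | none => 0
  | some (c, k) => code c k

-- ===== PRECONDITION & SPEC =====
-- Pre_find holds exactly where the Python A returns (both programs raise IndexError elsewhere):
-- the first access s[i] must be in range, and a letter must occur among the positions the walk
-- reaches before the index falls below -len(s) (for i ≥ 0 that is the whole string; for i < 0
-- the prefix up to i+len).
def Pre_find (i : Int) (s : String) : Prop :=
  -(s.toList.length : Int) ≤ i ∧ i < s.toList.length ∧
  (s.toList.take (if 0 ≤ i then s.toList.length else (i + s.toList.length + 1).toNat)).any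
    (fun c => PySem.Chars.isalpha c) = true
instance (i : Int) (s : String) : Decidable (Pre_find i s) := by unfold Pre_find; infer_instance

def pvWitness_find : Int × String := (0, "a")

def Spec_find (i : Int) (s : String) (out : Int) : Prop := out = find_alt i s
instance (i : Int) (s : String) (out : Int) : Decidable (Spec_find i s out) := by unfold Spec_find; infer_instance

-- ===== CLAIM (what is proved, stated in full; the proofs are below) =====
def Claim_equal_find : Prop := ∀ (i : Int) (s : String), Dom_find i s → Pre_find i s → Spec_find i s (find i s)

-- ===== LEMMAS AND PROOFS =====

-- the in-range position a (possibly negative) index i denotes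
def effIdx (n : Nat) (i : Int) : Int := if 0 ≤ i then i else i + n

lemma pyGet?_effIdx {α : Type} (xs : List α) (i : Int) (h1 : -(xs.length : Int) ≤ i) :
    PySem.List.pyGet? xs (effIdx xs.length i) = PySem.List.pyGet? xs i := by
  simp only [effIdx, PySem.List.pyGet?, PySem.List.pyIdx?]
  split_ifs <;> try rfl
  all_goals try omega
  all_goals (simp only [Option.bind_some]; congr 1; omega)

lemma effIdx_bounds (n : Nat) (i : Int) (h1 : -(n : Int) ≤ i) (h2 : i < n) :
    0 ≤ effIdx n i ∧ effIdx n i < n := by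
  simp only [effIdx]; split_ifs <;> omega

lemma loopB_shift (s : List Char) (k0 : Nat) :
    ∀ (f : Nat) (p : Int) (k : Nat),
      loopB s p (k + k0) f = (loopB s p k f).map (fun r => (r.1, r.2 + k0)) := by
  intro f
  induction f with
  | zero => intro p k; rfl
  | succ f ih =>
    intro p k
    simp only [loopB]
    cases PySem.List.pyGet? s p with
    | none => rfl
    | some c =>
      by_cases h : PySem.Chars.isalpha c = true
      · simp [h]
      · simp only [Bool.not_eq_true] at h
        simp only [h, Bool.false_eq_true, if_false]
        rw [show k + k0 + 1 = k + 1 + k0 by omega]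
        exact ih _ (k + 1)

lemma loopB_mono (s : List Char) :
    ∀ (f f' : Nat) (p : Int) (k : Nat) (r : Char × Nat), f ≤ f' →
      loopB s p k f = some r → loopB s p k f' = some r := by
  intro f
  induction f with
  | zero => intro f' p k r _ h; simp [loopB] at h
  | succ f ih =>
    intro f' p k r hle h
    obtain ⟨f'', rfl⟩ : ∃ f'', f' = f'' + 1 := ⟨f' - 1, by omega⟩
    simp only [loopB] at h ⊢
    cases hg : PySem.List.pyGet? s p with
    | none => simp [hg] at h
    | some c =>
      simp only [hg] at h ⊢
      by_cases hal : PySem.Chars.isalpha c = true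
      · simpa [hal] using h
      · simp only [Bool.not_eq_true] at hal
        simp only [hal, Bool.false_eq_true, if_false] at h ⊢
        exact ih f'' _ _ _ (by omega) h

lemma addLoop_eq (p : Int) (h : p ≤ 52) : addLoop p = (p - 1) % 52 + 1 := by
  induction p using addLoop.induct with
  | case1 p hp ih =>
    rw [addLoop, if_pos hp, ih (by omega)]
    have he : p + 52 - 1 = p - 1 + 52 * 1 := by ring
    rw [he, Int.add_mul_emod_self_left]
  | case2 p hp =>
    rw [addLoop, if_neg hp, Int.emod_eq_of_lt (by omega) (by omega)]
    omega

lemma subLoop_eq (p : Int) (h : 1 ≤ p) : subLoop p = (p - 1) % 52 + 1 := by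
  induction p using subLoop.induct with
  | case1 p hp ih =>
    rw [subLoop, if_pos hp, ih (by omega)]
    have he : p - 52 - 1 = p - 1 + 52 * (-1) := by ring
    rw [he, Int.add_mul_emod_self_left]
  | case2 p hp =>
    rw [subLoop, if_neg hp, Int.emod_eq_of_lt (by omega) (by omega)]
    omega

lemma process_prev_eq (v : Int) : process_prev v = (2 * v - 6) % 52 + 1 := by
  rw [process_prev]
  split_ifs with h1 h2
  · rw [Int.emod_eq_of_lt (by omega) (by omega)]; omega
  · rw [addLoop_eq _ (by omega)]; ring_nf
  · rw [subLoop_eq _ (by omega)]; ring_nf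

lemma code_step (c : Char) (k : Nat) :
    code c (k + 1) = (2 * code c k - 6) % 52 + 1 := by
  simp only [code, PySem.Int.mod_eq_emod_of_pos (by norm_num : (0:Int) < 52)]
  set b : Int := if PySem.Chars.islower c then (c.toNat : Int) - 96 else (c.toNat : Int) - 38 with hb
  congr 1
  have hk : ((2:Int) ^ k % 52) ≡ 2 ^ k [ZMOD 52] := Int.emod_emod_of_dvd _ dvd_rfl
  have hk1 : ((2:Int) ^ (k + 1) % 52) ≡ 2 ^ (k + 1) [ZMOD 52] := Int.emod_emod_of_dvd _ dvd_rfl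
  set mk : Int := (2:Int) ^ k % 52
  set X : Int := b * mk - 5 * (mk - 1) - 1 with hX
  have hXm : (X % 52) ≡ X [ZMOD 52] := Int.emod_emod_of_dvd _ dvd_rfl
  have h1 : b * ((2:Int) ^ (k + 1) % 52) - 5 * (((2:Int) ^ (k + 1) % 52) - 1) - 1
      ≡ b * 2 ^ (k + 1) - 5 * (2 ^ (k + 1) - 1) - 1 [ZMOD 52] :=
    ((hk1.mul_left b).sub ((hk1.sub_right 1).mul_left 5)).sub_right 1
  have h2 : 2 * (X % 52 + 1) - 6 ≡ 2 * (X + 1) - 6 [ZMOD 52] :=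
    (((hXm.add_right 1)).mul_left 2).sub_right 6
  have h3 : 2 * (X + 1) - 6 ≡ 2 * ((b * 2 ^ k - 5 * (2 ^ k - 1) - 1) + 1) - 6 [ZMOD 52] := by
    have := ((hk.mul_left b).sub ((hk.sub_right 1).mul_left 5)).sub_right 1
    exact (((this.add_right 1)).mul_left 2).sub_right 6
  have h4 : b * 2 ^ (k + 1) - 5 * (2 ^ (k + 1) - 1) - 1
      = 2 * ((b * 2 ^ k - 5 * (2 ^ k - 1) - 1) + 1) - 6 := by ring
  exact h1.trans (h4 ▸ (h2.trans h3).symm)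

lemma isalpha_convert_bounds (c : Char) (h : PySem.Chars.isalpha c = true) :
    1 ≤ convert c ∧ convert c ≤ 52 := by
  rw [PySem.Chars.isalpha, Bool.or_eq_true] at h
  rw [convert]
  rcases h with h | h
  · rw [PySem.Chars.isupper] at h
    simp only [Bool.and_eq_true, decide_eq_true_eq, Char.le_def] at h
    have h1 : 65 ≤ c.toNat := by have := h.1; simp [UInt32.le_iff_toNat_le] at this; omega
    have h2 : c.toNat ≤ 90 := by have := h.2; simp [UInt32.le_iff_toNat_le] at this; omega
    rw [if_neg]
    · omega
    · rw [PySem.Chars.islower]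
      simp only [Bool.and_eq_true, decide_eq_true_eq, Char.le_def, not_and]
      intro hx
      simp [UInt32.le_iff_toNat_le] at hx ⊢
      omega
  · have hb := h
    rw [PySem.Chars.islower] at h
    simp only [Bool.and_eq_true, decide_eq_true_eq, Char.le_def] at h
    have h1 : 97 ≤ c.toNat := by have := h.1; simp [UInt32.le_iff_toNat_le] at this; omega
    have h2 : c.toNat ≤ 122 := by have := h.2; simp [UInt32.le_iff_toNat_le] at this; omega
    rw [if_pos hb]
    omega

lemma code_zero (c : Char) (h : PySem.Chars.isalpha c = true) : code c 0 = convert c := by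
  simp only [code, PySem.Int.mod_eq_emod_of_pos (by norm_num : (0:Int) < 52)]
  have hb : (if PySem.Chars.islower c then (c.toNat : Int) - 96 else (c.toNat : Int) - 38)
      = convert c := by
    rw [convert]; split_ifs <;> ring
  rw [hb]
  have hbd := isalpha_convert_bounds c h
  have h1 : ((2:Int) ^ 0 % 52) = 1 := by decide
  rw [h1]
  have h2 : convert c * 1 - 5 * (1 - 1) - 1 = convert c - 1 := by ring
  rw [h2, Int.emod_eq_of_lt (by omega) (by omega)]
  omega

-- one unfolding of A's recursion, in the step case
lemma find_step (i : Int) (s : String) (c0 c1 : Char)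
    (hgi : PySem.List.pyGet? s.toList i = some c0)
    (hal : PySem.Chars.isalpha c0 = false)
    (hgi1 : PySem.List.pyGet? s.toList (i - 1) = some c1) :
    find i s = process_prev (find (i - 1) s) := by
  rw [find, hgi]
  simp only [hal, Bool.false_eq_true, if_false]
  rw [hgi1]
  by_cases h1 : PySem.Chars.isalpha c1 = true
  · simp only [h1, if_true]
    rw [find, hgi1]
    simp only [h1, if_true]
  · simp only [Bool.not_eq_true] at h1
    simp only [h1, Bool.false_eq_true, if_false]

-- take (e+1) has a letter but position e is not one → take e has a letter
lemma any_take_of_last_not (cs : List Char) (e : Nat) (he : e < cs.length)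
    (hany : (cs.take (e + 1)).any (fun c => PySem.Chars.isalpha c) = true)
    (hno : PySem.Chars.isalpha cs[e] = false) :
    (cs.take e).any (fun c => PySem.Chars.isalpha c) = true := by
  rw [List.take_add_one] at hany
  rw [List.any_append] at hany
  simp only [List.getElem?_eq_getElem he] at hany
  simp [hno] at hany
  rw [List.any_eq_true]
  exact hany

-- the main invariant: under Pre_find, B's walk from i finds a letter c after k steps,
-- A's value is code c k, and k ≤ i + len
lemma main_walk : ∀ (m : Nat) (i : Int) (s : String), Pre_find i s →
    (i + s.toList.length).toNat = m →
    ∃ c k, loopB s.toList i 0 (k + 1) = some (c, k) ∧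
      find i s = code c k ∧ (k : Int) ≤ i + s.toList.length := by
  intro m
  induction m using Nat.strong_induction_on with
  | _ m ih =>
    intro i s hpre hm
    obtain ⟨hlo, hhi, halpha⟩ := hpre
    have hnn : 0 < s.toList.length := by omega
    have heb := effIdx_bounds s.toList.length i hlo hhi
    cases hgi : PySem.List.pyGet? s.toList i with
    | none =>
      exact absurd ((PySem.List.pyGet?_eq_none_iff _ _).mp hgi) (by exact fun h => h ⟨hlo, hhi⟩)
    | some c0 =>
      have hge : PySem.List.pyGet? s.toList (effIdx s.toList.length i) = some c0 := by
        rw [pyGet?_effIdx _ _ hlo]; exact hgi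
      have hcast : effIdx s.toList.length i < (s.toList.length : Int) := by exact_mod_cast heb.2
      have hc0 := Option.some.inj
        ((PySem.List.pyGet?_eq_some_getElem s.toList heb.1 hcast).symm.trans hge)
      by_cases hal : PySem.Chars.isalpha c0 = true
      · refine ⟨c0, 0, ?_, ?_, by omega⟩
        · rw [loopB, hgi]
          simp [hal]
        · rw [find, hgi]
          simp only [hal, if_true]
          exact (code_zero c0 hal).symm
      · simp only [Bool.not_eq_true] at hal
        -- position effIdx i holds a non-letter; a letter sits strictly earlier in the walk
        have hkey : -(s.toList.length : Int) ≤ i - 1 ∧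
            (s.toList.take (if 0 ≤ i - 1 then s.toList.length
              else (i - 1 + s.toList.length + 1).toNat)).any (fun c => PySem.Chars.isalpha c) = true := by
          by_cases hi : 0 ≤ i
          · constructor
            · by_cases hi1 : 0 ≤ i - 1
              · omega
              · omega
            · by_cases hi1 : 0 ≤ i - 1
              · rw [if_pos hi1]; simpa [if_pos hi] using halpha
              · rw [if_neg hi1]
                have : (i - 1 + s.toList.length + 1).toNat = s.toList.length := by omega
                rw [this]; simpa [if_pos hi] using halpha
          · -- i < 0 : the prefix shrinks by one; its last element was c0, a non-letter
            have he : effIdx s.toList.length i = i + s.toList.length := by simp [effIdx, hi]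
            have he2 : (effIdx s.toList.length i).toNat = (i + (s.toList.length : Int)).toNat := by
              rw [he]
            rw [if_neg (by omega)] at halpha
            have hbound : (i + (s.toList.length : Int) + 1).toNat
                = (effIdx s.toList.length i).toNat + 1 := by rw [he2]; omega
            rw [hbound] at halpha
            have hx := any_take_of_last_not s.toList (effIdx s.toList.length i).toNat
              (by omega) halpha (hc0 ▸ hal)
            have hpos : 1 ≤ i + (s.toList.length : Int) := by
              by_contra hcon
              have h0 : (effIdx s.toList.length i).toNat = 0 := by rw [he2]; omega
              rw [h0] at hx
              simp at hx
            constructor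
            · omega
            · rw [if_neg (by omega)]
              have hb2 : (i - 1 + (s.toList.length : Int) + 1).toNat
                  = (effIdx s.toList.length i).toNat := by rw [he2]; omega
              rw [hb2]; exact hx
        obtain ⟨hlo1, halpha1⟩ := hkey
        have hpre1 : Pre_find (i - 1) s := ⟨hlo1, by omega, halpha1⟩
        have hmlt : (i - 1 + (s.toList.length : Int)).toNat < m := by omega
        obtain ⟨c, k, hloop, hfind, hk⟩ := ih _ hmlt (i - 1) s hpre1 rfl
        refine ⟨c, k + 1, ?_, ?_, by push_cast; omega⟩
        · rw [loopB, hgi]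
          simp only [hal, Bool.false_eq_true, if_false]
          have := loopB_shift s.toList 1 (k + 1) (i - 1) 0
          simp only [Nat.zero_add] at this
          rw [this, hloop]
          rfl
        · cases hgi1 : PySem.List.pyGet? s.toList (i - 1) with
          | none =>
            exact absurd ((PySem.List.pyGet?_eq_none_iff _ _).mp hgi1)
              (by exact fun h => h ⟨hlo1, by omega⟩)
          | some c1 =>
            rw [find_step i s c0 c1 hgi hal hgi1, hfind, process_prev_eq, code_step]

-- ===== VERDICT (by name: the statement is the Claim_ definition above) =====
theorem find_spec : Claim_equal_find := by
  intro i s _ hpre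
  unfold Spec_find
  obtain ⟨c, k, hloop, hfind, hk⟩ := main_walk (i + s.toList.length).toNat i s hpre rfl
  have hhi := hpre.2.1
  rw [find_alt]
  have hfuel : k + 1 ≤ 2 * s.toList.length + 2 := by omega
  rw [loopB_mono s.toList (k + 1) (2 * s.toList.length + 2) _ _ _ hfuel hloop]
  exact hfind
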